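-- pv_equiv track=rewrite | github.com/isk02206/python | informatics/BA_1 2017-2018/series_6/Complementary sequences.py | frequencySequence
-- ===== SOURCE A (Python) =====
-- def increasing(pn):
--     '''
--     >>> increasing([2, 3, 5, 7, 11, 13])
--     True
--     >>> increasing((0, 0, 1, 2, 2, 3, 3, 4, 4, 4, 4, 5, 5, 6))
--     True
--     >>> increasing([5, 3, 2, 7, 8, 1, 9])
--     False
--     '''
--     for i in range(len(pn)-1):
--         a = pn[i]
--         b = pn[i+1]
--         if a > b:
--             return False
--         if a <= b:
--             continue
--     return True
--
-- def frequencySequence(pn):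
--     '''
--     >>> frequencySequence([2, 3, 5, 7, 11, 13])
--     [0, 0, 1, 2, 2, 3, 3, 4, 4, 4, 4, 5, 5, 6]
--     >>> frequencySequence((0, 0, 1, 2, 2, 3, 3, 4, 4, 4, 4, 5, 5, 6))
--     [2, 3, 5, 7, 11, 13, 14]
--     >>> frequencySequence([5, 3, 2, 7, 8, 1, 9])
--     Traceback (most recent call last):
--     AssertionError: given sequence is not increasing
--     '''
--     record = int(pn[-1])+1
--     frequencyList = []
--     count = 0
--     if increasing(pn) == True:
--         for i in range(record):
--             for j in pn:
--                 if i == j: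
--                     count += 1
--             else:
--                 frequencyList.append(count)
--         return frequencyList
--     else:
--         raise AssertionError('given sequence is not increasing')
-- ===== SOURCE B (Python) =====
-- def frequencySequence(pn):
--     if any(a > b for a, b in zip(pn, pn[1:])):
--         raise AssertionError('given sequence is not increasing')
--     res = []
--     k = 0
--     for i in range(int(pn[-1]) + 1):
--         while k < len(pn) and pn[k] <= i:
--             k += 1
--         res.append(k)
--     return res
-- ===== Notes on version B (the rewrite author's own statement) =====
-- stated objective: alternative
-- what changed: Replaced the O(record*n) double loop (for every i in range(last+1) rescan the whole list counting matches of i) by a two-pointer single pass in which one index k advances monotonically through the sorted list as i grows, O(n + record); Pre_ restricts to the task's natural domain of nonempty nondecreasing sequences of nonnegative integers, excluding inputs where A raises (empty list, non-nondecreasing list) and lists with negative elements, which are outside the frequency-sequence domain and which A's range(record) scan starting at 0 silently ignores while B's cumulative count includes them.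
-- outside the precondition, e.g. on frequencySequence([-1, 2]): A returns [0, 0, 1], B returns [1, 1, 2]
import Mathlib
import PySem

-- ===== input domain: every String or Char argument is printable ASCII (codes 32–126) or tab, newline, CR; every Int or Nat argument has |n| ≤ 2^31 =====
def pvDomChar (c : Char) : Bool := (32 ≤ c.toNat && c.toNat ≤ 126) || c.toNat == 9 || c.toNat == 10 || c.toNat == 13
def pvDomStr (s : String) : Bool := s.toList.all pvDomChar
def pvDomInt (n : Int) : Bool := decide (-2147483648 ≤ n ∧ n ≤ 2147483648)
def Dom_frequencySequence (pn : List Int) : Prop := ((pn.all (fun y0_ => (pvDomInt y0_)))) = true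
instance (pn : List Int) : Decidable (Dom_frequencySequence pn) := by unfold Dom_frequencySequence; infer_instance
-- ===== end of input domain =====

-- B replaces A's double loop (for each i in range(pn[-1]+1), rescan all of pn) by a two-pointer
-- single pass: one index advances monotonically through the sorted list while i grows.

-- ===== PORT A =====
-- helper `increasing` of A: the early-return index loop is List.all over the same range
def pvIncreasing (pn : List Int) : Bool :=
  (PySem.List.pyRange 0 ((pn.length : Int) - 1) 1).all (fun i =>
    match PySem.List.pyGet? pn i, PySem.List.pyGet? pn (i + 1) with
    | some a, some b => !(a > b)
    | _, _ => true)

def frequencySequence (pn : List Int) : List Int :=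
  let record := (PySem.List.pyGet? pn (-1)).getD 0 + 1
  if pvIncreasing pn = true then
    ((PySem.List.pyRange 0 record 1).foldl (fun (st : List Int × Int) i =>
      let c := pn.foldl (fun c j => if i == j then c + 1 else c) st.2
      (st.1 ++ [c], c)) ([], 0)).1
  else []  -- Python raises AssertionError here; excluded by Pre_

-- ===== PORT B =====
-- the inner `while k < len(pn) and pn[k] <= i: k += 1` of B
def pvAdvance (pn : List Int) (i : Int) (k : Nat) : Nat :=
  if h : k < pn.length then
    if pn[k] ≤ i then pvAdvance pn i (k + 1) else k
  else k
termination_by pn.length - k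

def frequencySequence_alt (pn : List Int) : List Int :=
  if (pn.zip (pn.drop 1)).any (fun p => p.1 > p.2) then []  -- Python raises AssertionError; excluded by Pre_
  else
    ((PySem.List.pyRange 0 ((PySem.List.pyGet? pn (-1)).getD 0 + 1) 1).foldl
      (fun (st : List Int × Nat) i =>
        let k := pvAdvance pn i st.2
        (st.1 ++ [(k : Int)], k)) ([], 0)).1

-- ===== PRECONDITION & SPEC =====
-- Pre_ restricts to the task's natural domain (nonempty nondecreasing sequences of nonnegative
-- frequency bounds): it excludes the empty list (A raises IndexError), non-nondecreasing lists
-- (A raises AssertionError), and lists containing negative elements, which are outside the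
-- frequency-sequence domain and which A's range(record) scan starting at 0 silently ignores.
def Pre_frequencySequence (pn : List Int) : Prop :=
  pn ≠ [] ∧ List.Pairwise (· ≤ ·) pn ∧ ∀ x ∈ pn, 0 ≤ x
instance (pn : List Int) : Decidable (Pre_frequencySequence pn) := by
  unfold Pre_frequencySequence; infer_instance
def pvWitness_frequencySequence : List Int := [2, 3, 5]

def Spec_frequencySequence (pn : List Int) (out : List Int) : Prop := out = frequencySequence_alt pn
instance (pn : List Int) (out : List Int) : Decidable (Spec_frequencySequence pn out) := by unfold Spec_frequencySequence; infer_instance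

-- ===== CLAIM (what is proved, stated in full; the proofs are below) =====
def Claim_equal_frequencySequence : Prop := ∀ (pn : List Int), Dom_frequencySequence pn → Pre_frequencySequence pn → Spec_frequencySequence pn (frequencySequence pn)

-- ===== LEMMAS AND PROOFS =====

-- number of elements ≤ i
def pvCntLe (pn : List Int) (i : Int) : Nat := pn.countP (fun v => decide (v ≤ i))

lemma pvCntLe_mono (pn : List Int) {i j : Int} (h : i ≤ j) : pvCntLe pn i ≤ pvCntLe pn j := by
  unfold pvCntLe
  refine List.countP_mono_left (fun x _ hx => ?_)
  simp only [decide_eq_true_eq] at hx ⊢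
  omega

-- in a sorted list, the elements ≤ i are exactly the prefix of length pvCntLe
lemma pvCntLe_prefix (pn : List Int) (hs : List.Pairwise (· ≤ ·) pn) (i : Int) :
    ∀ j (hj : j < pn.length), (pn[j] ≤ i ↔ j < pvCntLe pn i) := by
  induction pn with
  | nil => simp
  | cons a t ih =>
    rcases List.pairwise_cons.1 hs with ⟨ha, ht⟩
    intro j hj
    unfold pvCntLe
    by_cases hai : a ≤ i
    · have hpa : decide (a ≤ i) = true := by simp [hai]
      rw [List.countP_cons, hpa, if_pos rfl]
      cases j with
      | zero => simp only [List.getElem_cons_zero]; omega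
      | succ m =>
        have hrec := ih ht m (by simpa using hj)
        unfold pvCntLe at hrec
        simp only [List.getElem_cons_succ]
        omega
    · have hpa : decide (a ≤ i) = false := by simp [hai]
      rw [List.countP_cons, hpa, if_neg (by simp)]
      have hz : t.countP (fun v => decide (v ≤ i)) = 0 := by
        rw [List.countP_eq_zero]
        intro x hx
        have := ha x hx
        simp only [decide_eq_true_eq]
        omega
      cases j with
      | zero => simp only [List.getElem_cons_zero]; omega
      | succ m =>
        have hrec := ih ht m (by simpa using hj)
        unfold pvCntLe at hrec
        simp only [List.getElem_cons_succ]
        omega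

lemma pvAdvance_eq (pn : List Int) (hs : List.Pairwise (· ≤ ·) pn) (i : Int) :
    ∀ k, k ≤ pvCntLe pn i → pvAdvance pn i k = pvCntLe pn i := by
  have hcle : pvCntLe pn i ≤ pn.length := by unfold pvCntLe; exact List.countP_le_length
  intro k hk
  induction h : pn.length - k generalizing k with
  | zero =>
    have hk' : k = pvCntLe pn i := by omega
    subst hk'
    unfold pvAdvance
    split
    · rw [if_neg]
      intro hle
      exact absurd ((pvCntLe_prefix pn hs i _ ‹_›).1 hle) (by omega)
    · rfl
  | succ n ih =>
    unfold pvAdvance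
    rcases Nat.lt_or_ge k (pvCntLe pn i) with hlt | hge
    · have hkl : k < pn.length := by omega
      rw [dif_pos hkl, if_pos ((pvCntLe_prefix pn hs i k hkl).2 hlt)]
      exact ih (k + 1) (by omega) (by omega)
    · have hk' : k = pvCntLe pn i := by omega
      subst hk'
      split
      · rw [if_neg]
        intro hle
        exact absurd ((pvCntLe_prefix pn hs i _ ‹_›).1 hle) (by omega)
      · rfl

-- B's fold produces the list of counts pvCntLe, carrying pvCntLe of the previous i as state
lemma foldB (pn : List Int) (hs : List.Pairwise (· ≤ ·) pn) :
    ∀ m : Nat,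
    (((List.range m).map (fun k : Nat => (k : Int))).foldl
      (fun (st : List Int × Nat) i =>
        let k := pvAdvance pn i st.2
        (st.1 ++ [(k : Int)], k)) ([], 0))
    = ((List.range m).map (fun k : Nat => (pvCntLe pn (k : Int) : Int)),
       if m = 0 then 0 else pvCntLe pn ((m : Int) - 1)) := by
  intro m
  induction m with
  | zero => simp
  | succ m ih =>
    rw [List.range_succ, List.map_append, List.map_append, List.foldl_append, ih]
    simp only [List.map_cons, List.map_nil, List.foldl_cons, List.foldl_nil]
    have hstep : pvAdvance pn (m : Int) (if m = 0 then 0 else pvCntLe pn ((m : Int) - 1))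
        = pvCntLe pn (m : Int) := by
      split
      · exact pvAdvance_eq pn hs _ 0 (Nat.zero_le _)
      · exact pvAdvance_eq pn hs _ _ (pvCntLe_mono pn (by omega))
    rw [hstep]
    simp only [Nat.succ_ne_zero, if_false]
    rw [show ((m + 1 : Nat) : Int) - 1 = (m : Int) by push_cast; ring]

-- A's cumulative count: number of elements x with 0 ≤ x ≤ k
def pvCnt (pn : List Int) (k : Int) : Int := (pn.countP (fun v => decide (0 ≤ v ∧ v ≤ k)) : Int)

lemma pvCnt_neg (pn : List Int) (k : Int) (hk : k < 0) : pvCnt pn k = 0 := by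
  unfold pvCnt
  rw [List.countP_eq_zero.2]
  · rfl
  · intro x hx; simp; omega

lemma pvCnt_split (pn : List Int) (k : Int) (hk : 0 ≤ k) :
    pvCnt pn k = pvCnt pn (k - 1) + (pn.countP (fun j => k == j) : Int) := by
  unfold pvCnt
  induction pn with
  | nil => simp
  | cons a t ih =>
    rw [List.countP_cons, List.countP_cons, List.countP_cons]
    push_cast
    rw [ih]
    simp only [decide_eq_true_eq, beq_iff_eq]
    split_ifs <;> push_cast <;> omega

-- A's fold produces the list of cumulative counts pvCnt
lemma foldA (pn : List Int) (m : Nat) :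
    (((List.range m).map (fun k : Nat => (k : Int))).foldl (fun (st : List Int × Int) i =>
      let c := pn.foldl (fun c j => if i == j then c + 1 else c) st.2
      (st.1 ++ [c], c)) ([], 0))
    = ((List.range m).map (fun k : Nat => pvCnt pn (k : Int)), pvCnt pn ((m : Int) - 1)) := by
  induction m with
  | zero => simp [pvCnt_neg pn (-1) (by omega)]
  | succ m ih =>
    rw [List.range_succ, List.map_append, List.map_append, List.foldl_append, ih]
    simp only [List.map_cons, List.map_nil, List.foldl_cons, List.foldl_nil]
    rw [PySem.List.foldl_count_if (fun j => ((m : Nat) : Int) == j) pn]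
    have h := pvCnt_split pn m (by positivity)
    rw [← h]
    have : ((m : Nat) : Int) = (((m + 1 : Nat)) : Int) - 1 := by push_cast; ring
    rw [← this]

lemma pvIncreasing_of_pairwise (pn : List Int) (hs : List.Pairwise (· ≤ ·) pn) :
    pvIncreasing pn = true := by
  unfold pvIncreasing
  rw [List.all_eq_true]
  intro i hi
  rw [PySem.List.mem_pyRange_one] at hi
  have h0 : 0 ≤ i := hi.1
  have h1 : i < (pn.length : Int) - 1 := hi.2
  rw [PySem.List.pyGet?_eq_some_getElem pn h0 (by omega),
      PySem.List.pyGet?_eq_some_getElem pn (show (0:Int) ≤ i + 1 by omega) (by omega)]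
  have := (List.pairwise_iff_getElem.1 hs) i.toNat (i + 1).toNat (by omega) (by omega) (by omega)
  simp only [gt_iff_lt, Bool.not_eq_true', decide_eq_false_iff_not, not_lt]
  exact this

lemma zip_any_false (pn : List Int) (hs : List.Pairwise (· ≤ ·) pn) :
    (pn.zip (pn.drop 1)).any (fun p => p.1 > p.2) = false := by
  rw [List.any_eq_false]
  intro p hp
  rw [List.mem_iff_getElem] at hp
  obtain ⟨i, hi, hpi⟩ := hp
  rw [List.getElem_zip] at hpi
  have hlen : i < (pn.drop 1).length := (List.lt_length_right_of_zip hi)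
  simp only [List.length_drop] at hlen
  have := (List.pairwise_iff_getElem.1 hs) i (1 + i) (by omega) (by omega) (by omega)
  subst hpi
  simp only [List.getElem_drop, gt_iff_lt, decide_eq_true_eq, not_lt]
  exact this

-- ===== VERDICT (by name: the statement is the Claim_ definition above) =====
theorem frequencySequence_spec : Claim_equal_frequencySequence := by
  intro pn _ hpre
  rcases hpre with ⟨hne, hs, hpos⟩
  unfold Spec_frequencySequence frequencySequence frequencySequence_alt
  rw [zip_any_false pn hs, pvIncreasing_of_pairwise pn hs]
  simp only [Bool.false_eq_true, if_false, if_true]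
  rw [PySem.List.pyGet?_neg_one, List.getLast?_eq_some_getLast (h := hne), Option.getD_some]
  set M := pn.getLast hne with hM
  have hM0 : 0 ≤ M := hpos M (List.getLast_mem hne)
  have hR : PySem.List.pyRange 0 (M + 1) 1
      = (List.range (M + 1).toNat).map (fun k : Nat => (k : Int)) := by
    rw [PySem.List.pyRange_one]; simp
  rw [hR, foldA pn (M + 1).toNat, foldB pn hs (M + 1).toNat]
  simp only []
  refine List.map_congr_left (fun k _ => ?_)
  unfold pvCnt pvCntLe
  congr 1
  refine List.countP_congr (fun x hx => ?_)
  have := hpos x hx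
  simp only [decide_eq_true_eq]
  omega
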